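-- pv_equiv track=rewrite | github.com/GodRibbi/lajigobang | main.py | pointcheck
-- ===== SOURCE A (Python) =====
-- win=["CMMMM","MCMMM","MMCMM","MMMCM","MMMMC"]#10000
--
-- mustdefense=["OOOOC","OCOOO","OOCOO","OOOCO","COOOO"]#6000
--
-- twowin=[".CMMM..",".MCMM.",".MMCM.","..MMMC."]#5000
--
-- twowins=["C.MMM","MMM.C"]#
--
-- twodefense=[".COOO..","..OOOC.",".OOCO.",".OCOO."]#2500
--
-- twodefenses=[".COOO.",".OOOC."]#2500
--
-- attack=["OCMMM.","OMCMM.","OMMCM.","OMMMC."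
--         ,".CMMMO",".MCMMO",".MMCMO",".MMMCO"
--         ,".MC.MM.",".MM.CM.","..MMM.C","C.MMM.."
--         ,".M.CMM.",".MMC.M."]#2000
--
-- twoattack=["..MMC..","..MCM..","..CMM.."]#400
--
-- twoattacks=[".C.MM.",".MM.C."]
--
-- defense=["..OOC..","..OCO..",".C.OO.",".OO.C.","..COO..","MOOOC.",".COOOM"]#400
--
-- noatkdef=[".MMCO",".MCMO",".CMMO","OMMC.","OMCM.","OCMM.","MOOC","COOM"]#200
--
-- layout=["...MC...","...CM..."]#500
--
-- hlow=["..OC..","..CO.."]#200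
--
-- low=["..O.C..","..C.M..","..C.O..","..M.C.."]#100
--
-- def pointcheck(a):
--     for b in win:
--         if b in a:
--             return 100000
--     for b in mustdefense:
--         if b in a:
--             return 8000
--     for b in twowin:
--         if b in a:
--             return 5000
--     for b in twowins:
--         if b in a:
--             return 4900
--     for b in attack:
--         if b in a:
--             return 3000
--     for b in twodefense:
--         if b in a:
--             return 2500
--     for b in twodefenses:
--         if b in a:
--             return 2000
--     for b in twoattack:
--         if b in a:
--             return 800
--     for b in twoattacks:
--         if b in a:
--             return 600
--     for b in layout:
--         if b in a:
--             return 500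
--     for b in defense:
--         if b in a:
--             return 400
--     for b in noatkdef:
--         if b in a:
--             return 300
--     for b in hlow:
--         if b in a:
--             return 200
--     for b in low:
--         if b in a:
--             return 100
--     return 0
-- ===== SOURCE B (Python) =====
-- _GROUPS = [
--     (["CMMMM","MCMMM","MMCMM","MMMCM","MMMMC"], 100000),
--     (["OOOOC","OCOOO","OOCOO","OOOCO","COOOO"], 8000),
--     ([".CMMM..",".MCMM.",".MMCM.","..MMMC."], 5000),
--     (["C.MMM","MMM.C"], 4900),
--     (["OCMMM.","OMCMM.","OMMCM.","OMMMC."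
--      ,".CMMMO",".MCMMO",".MMCMO",".MMMCO"
--      ,".MC.MM.",".MM.CM.","..MMM.C","C.MMM.."
--      ,".M.CMM.",".MMC.M."], 3000),
--     ([".COOO..","..OOOC.",".OOCO.",".OCOO."], 2500),
--     ([".COOO.",".OOOC."], 2000),
--     (["..MMC..","..MCM..","..CMM.."], 800),
--     ([".C.MM.",".MM.C."], 600),
--     (["...MC...","...CM..."], 500),
--     (["..OOC..","..OCO..",".C.OO.",".OO.C.","..COO..","MOOOC.",".COOOM"], 400),
--     ([".MMCO",".MCMO",".CMMO","OMMC.","OMCM.","OCMM.","MOOC","COOM"], 300),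
--     (["..OC..","..CO.."], 200),
--     (["..O.C..","..C.M..","..C.O..","..M.C.."], 100),
-- ]
--
-- _TABLE = [(p, s) for ps, s in _GROUPS for p in ps]
--
-- def pointcheck(a):
--     # scores are strictly decreasing in priority order, so the max matched
--     # score over one flat table equals the first-matched category's score
--     best = 0
--     for pat, score in _TABLE:
--         if pat in a and score > best:
--             best = score
--     return best
-- ===== Notes on version B (the rewrite author's own statement) =====
-- stated objective: alternative
-- what changed: Replaced the 14-stage early-return cascade over category lists by a single flat (pattern, score) table scanned once with a running max (correct because category scores strictly decrease with priority).
import Mathlib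
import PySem

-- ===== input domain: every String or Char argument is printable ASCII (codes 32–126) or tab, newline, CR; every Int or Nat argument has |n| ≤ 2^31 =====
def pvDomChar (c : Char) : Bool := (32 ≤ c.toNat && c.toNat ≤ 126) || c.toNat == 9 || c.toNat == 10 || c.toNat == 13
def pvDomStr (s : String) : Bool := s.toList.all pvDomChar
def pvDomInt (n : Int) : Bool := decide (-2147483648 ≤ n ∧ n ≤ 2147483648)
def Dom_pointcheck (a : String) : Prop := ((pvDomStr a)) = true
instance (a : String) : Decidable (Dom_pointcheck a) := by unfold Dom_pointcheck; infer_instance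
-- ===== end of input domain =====

-- B replaces A's 14-stage early-return cascade by a single flat (pattern, score) table
-- scanned once with a running max; equal because category scores strictly decrease with priority.

-- ===== PORT A =====
def pvWin : List String := ["CMMMM","MCMMM","MMCMM","MMMCM","MMMMC"]
def pvMustdefense : List String := ["OOOOC","OCOOO","OOCOO","OOOCO","COOOO"]
def pvTwowin : List String := [".CMMM..",".MCMM.",".MMCM.","..MMMC."]
def pvTwowins : List String := ["C.MMM","MMM.C"]
def pvAttack : List String := ["OCMMM.","OMCMM.","OMMCM.","OMMMC."
        ,".CMMMO",".MCMMO",".MMCMO",".MMMCO"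
        ,".MC.MM.",".MM.CM.","..MMM.C","C.MMM.."
        ,".M.CMM.",".MMC.M."]
def pvTwodefense : List String := [".COOO..","..OOOC.",".OOCO.",".OCOO."]
def pvTwodefenses : List String := [".COOO.",".OOOC."]
def pvTwoattack : List String := ["..MMC..","..MCM..","..CMM.."]
def pvTwoattacks : List String := [".C.MM.",".MM.C."]
def pvDefense : List String := ["..OOC..","..OCO..",".C.OO.",".OO.C.","..COO..","MOOOC.",".COOOM"]
def pvNoatkdef : List String := [".MMCO",".MCMO",".CMMO","OMMC.","OMCM.","OCMM.","MOOC","COOM"]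
def pvLayout : List String := ["...MC...","...CM..."]
def pvHlow : List String := ["..OC..","..CO.."]
def pvLow : List String := ["..O.C..","..C.M..","..C.O..","..M.C.."]

-- each 'for b in cat: if b in a: return r' loop is 'if cat.any (b in a) then r else <rest>'
def pointcheck (a : String) : Int :=
  if pvWin.any (fun b => PySem.Str.isIn b a) then 100000
  else if pvMustdefense.any (fun b => PySem.Str.isIn b a) then 8000
  else if pvTwowin.any (fun b => PySem.Str.isIn b a) then 5000
  else if pvTwowins.any (fun b => PySem.Str.isIn b a) then 4900
  else if pvAttack.any (fun b => PySem.Str.isIn b a) then 3000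
  else if pvTwodefense.any (fun b => PySem.Str.isIn b a) then 2500
  else if pvTwodefenses.any (fun b => PySem.Str.isIn b a) then 2000
  else if pvTwoattack.any (fun b => PySem.Str.isIn b a) then 800
  else if pvTwoattacks.any (fun b => PySem.Str.isIn b a) then 600
  else if pvLayout.any (fun b => PySem.Str.isIn b a) then 500
  else if pvDefense.any (fun b => PySem.Str.isIn b a) then 400
  else if pvNoatkdef.any (fun b => PySem.Str.isIn b a) then 300
  else if pvHlow.any (fun b => PySem.Str.isIn b a) then 200
  else if pvLow.any (fun b => PySem.Str.isIn b a) then 100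
  else 0

-- ===== PORT B =====
def pvGroups : List (List String × Int) :=
  [(pvWin, 100000), (pvMustdefense, 8000), (pvTwowin, 5000), (pvTwowins, 4900),
   (pvAttack, 3000), (pvTwodefense, 2500), (pvTwodefenses, 2000), (pvTwoattack, 800),
   (pvTwoattacks, 600), (pvLayout, 500), (pvDefense, 400), (pvNoatkdef, 300),
   (pvHlow, 200), (pvLow, 100)]

-- _TABLE = [(p, s) for ps, s in _GROUPS for p in ps]
def pvTable : List (String × Int) :=
  pvGroups.flatMap (fun g => g.1.map (fun p => (p, g.2)))

-- one pass: best = 0; for pat, score in _TABLE: if pat in a and score > best: best = score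
def pointcheck_alt (a : String) : Int :=
  pvTable.foldl (fun best ps => if PySem.Str.isIn ps.1 a && decide (best < ps.2) then ps.2 else best) 0

-- ===== PRECONDITION & SPEC =====
def Spec_pointcheck (a : String) (out : Int) : Prop := out = pointcheck_alt a
instance (a : String) (out : Int) : Decidable (Spec_pointcheck a out) := by unfold Spec_pointcheck; infer_instance

-- ===== CLAIM (what is proved, stated in full; the proofs are below) =====
def Claim_equal_pointcheck : Prop := ∀ (a : String), Dom_pointcheck a → Spec_pointcheck a (pointcheck a)

-- ===== LEMMAS AND PROOFS =====

-- A's cascade, generically over a list of (category, score) groups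
def pvCasc (a : String) : List (List String × Int) → Int
  | [] => 0
  | (ps, s) :: rest => if ps.any (fun b => PySem.Str.isIn b a) then s else pvCasc a rest

-- B's loop step
def pvStep (a : String) (best : Int) (ps : String × Int) : Int :=
  if PySem.Str.isIn ps.1 a && decide (best < ps.2) then ps.2 else best

-- folding over a block of patterns that all carry the same score s
lemma pvFold_block (a : String) (s : Int) :
    ∀ (ps : List String) (best : Int),
      (ps.map (fun p => (p, s))).foldl (pvStep a) best
        = if ps.any (fun b => PySem.Str.isIn b a) && decide (best < s) then s else best := by
  intro ps
  induction ps with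
  | nil => intro best; simp
  | cons p ps ih =>
    intro best
    simp only [List.map_cons, List.foldl_cons, List.any_cons, pvStep]
    by_cases hin : PySem.Chars.isIn p.toList a.toList = true
    · by_cases hlt : best < s
      · simp [hin, hlt, ih]
      · simp [hin, hlt, ih]
    · simp only [Bool.not_eq_true] at hin
      simp [hin, ih]


-- the accumulator never decreases below entries it dominates
lemma pvFold_const (a : String) :
    ∀ (l : List (String × Int)) (best : Int), (∀ q ∈ l, q.2 ≤ best) →
      l.foldl (pvStep a) best = best := by
  intro l
  induction l with
  | nil => intro best _; rfl
  | cons q l ih =>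
    intro best h
    have h1 : q.2 ≤ best := h q (List.mem_cons_self ..)
    simp only [List.foldl_cons, pvStep]
    have : ¬ best < q.2 := not_lt.mpr h1
    simp only [this, decide_false, Bool.and_false, Bool.false_eq_true, if_neg, not_false_iff]
    exact ih best (fun r hr => h r (List.mem_cons_of_mem _ hr))

-- main: flat max-fold equals the cascade when scores strictly decrease and are positive
lemma pvMain (a : String) :
    ∀ (groups : List (List String × Int)),
      groups.Pairwise (fun g h => h.2 < g.2) → (∀ g ∈ groups, 0 < g.2) →
      (groups.flatMap (fun g => g.1.map (fun p => (p, g.2)))).foldl (pvStep a) 0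
        = pvCasc a groups := by
  intro groups
  induction groups with
  | nil => intro _ _; rfl
  | cons g rest ih =>
    obtain ⟨ps, s⟩ := g
    intro hpw hpos
    have hpw' := (List.pairwise_cons.mp hpw)
    have hs : (0:Int) < s := hpos _ (List.mem_cons_self ..)
    simp only [List.flatMap_cons, List.foldl_append, pvCasc]
    rw [pvFold_block]
    by_cases hany : ps.any (fun b => PySem.Str.isIn b a) = true
    · simp only [hany, hs, decide_true, Bool.and_true, if_pos]
      apply pvFold_const
      intro q hq
      simp only [List.mem_flatMap] at hq
      obtain ⟨h, hh, hq⟩ := hq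
      simp only [List.mem_map] at hq
      obtain ⟨p, _, rfl⟩ := hq
      exact le_of_lt (hpw'.1 h hh)
    · simp only [hany, Bool.false_and, Bool.false_eq_true, if_neg, not_false_iff]
      exact ih hpw'.2 (fun h hh => hpos h (List.mem_cons_of_mem _ hh))

lemma pvA_eq_casc (a : String) : pointcheck a = pvCasc a pvGroups := rfl

lemma pvB_eq_fold (a : String) :
    pointcheck_alt a
      = (pvGroups.flatMap (fun g => g.1.map (fun p => (p, g.2)))).foldl (pvStep a) 0 := rfl

-- ===== VERDICT (by name: the statement is the Claim_ definition above) =====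
theorem pointcheck_spec : Claim_equal_pointcheck := by
  intro a _
  unfold Spec_pointcheck
  rw [pvA_eq_casc, pvB_eq_fold, pvMain]
  · decide
  · decide
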